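-- pv_equiv track=rewrite | github.com/Zednosius/AdventOfCode2018 | Day2/day2.py | sum_rule
-- ===== SOURCE A (Python) =====
-- def sum_rule(twos, threes, m):
--     if all(v in m.values() for v in [2, 3]):
--         return (twos+1, threes+1)
--     elif 2 in m.values():
--         return (twos+1, threes)
--     elif 3 in m.values():
--         return (twos, threes+1)
--     else:
--         return (twos, threes)
-- ===== SOURCE B (Python) =====
-- def sum_rule(twos, threes, m):
--     # Single pass over the dict values with two boolean accumulators and an
--     # early exit once both 2 and 3 have been seen.
--     h2 = h3 = False
--     for v in m.values():
--         if v == 2: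
--             h2 = True
--         elif v == 3:
--             h3 = True
--         if h2 and h3:
--             break
--     return (twos + h2, threes + h3)
-- ===== Notes on version B (the rewrite author's own statement) =====
-- stated objective: alternative
-- what changed: Replaces A's up-to-four separate membership scans of m.values() (an all(...) scan plus elif chain) by one single pass over the values maintaining two boolean flags with early exit, then adds the flags to the counters.
import Mathlib
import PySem

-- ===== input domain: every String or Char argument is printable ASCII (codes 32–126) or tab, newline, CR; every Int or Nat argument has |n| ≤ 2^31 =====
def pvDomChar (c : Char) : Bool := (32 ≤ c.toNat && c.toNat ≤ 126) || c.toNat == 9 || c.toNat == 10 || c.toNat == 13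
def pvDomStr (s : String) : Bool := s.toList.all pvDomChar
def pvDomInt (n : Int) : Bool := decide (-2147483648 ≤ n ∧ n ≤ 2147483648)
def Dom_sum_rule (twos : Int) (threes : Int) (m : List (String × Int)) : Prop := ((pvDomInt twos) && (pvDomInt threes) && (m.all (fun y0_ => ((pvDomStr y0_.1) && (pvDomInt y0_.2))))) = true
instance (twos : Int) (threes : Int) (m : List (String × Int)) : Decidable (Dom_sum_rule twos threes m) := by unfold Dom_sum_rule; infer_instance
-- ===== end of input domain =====

-- ===== PORT A =====
-- Literal port of A: the all([2,3]) scan, then the elif chain over membership in m.values().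
def sum_rule (twos : Int) (threes : Int) (m : List (String × Int)) : Int × Int :=
  let vals := m.map Prod.snd
  if [2, 3].all (fun v => (v : Int) ∈ vals) then (twos + 1, threes + 1)
  else if (2 : Int) ∈ vals then (twos + 1, threes)
  else if (3 : Int) ∈ vals then (twos, threes + 1)
  else (twos, threes)

-- ===== PORT B =====
-- B's loop: one pass over the values with two boolean flags, early exit when both are set.
def sumRuleScan : List Int → Bool → Bool → Bool × Bool
  | [], h2, h3 => (h2, h3)
  | v :: vs, h2, h3 =>
    let h2' := if v = 2 then true else h2
    let h3' := if v = 2 then h3 else if v = 3 then true else h3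
    if h2' && h3' then (h2', h3') else sumRuleScan vs h2' h3'

-- B (alternative): single pass with accumulators instead of repeated membership scans.
def sum_rule_alt (twos : Int) (threes : Int) (m : List (String × Int)) : Int × Int :=
  let (h2, h3) := sumRuleScan (m.map Prod.snd) false false
  (twos + (if h2 then 1 else 0), threes + (if h3 then 1 else 0))

-- ===== PRECONDITION & SPEC =====
def Spec_sum_rule (twos : Int) (threes : Int) (m : List (String × Int)) (out : Int × Int) : Prop := out = sum_rule_alt twos threes m
instance (twos : Int) (threes : Int) (m : List (String × Int)) (out : Int × Int) : Decidable (Spec_sum_rule twos threes m out) := by unfold Spec_sum_rule; infer_instance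

-- ===== CLAIM (what is proved, stated in full; the proofs are below) =====
def Claim_equal_sum_rule : Prop := ∀ (twos : Int) (threes : Int) (m : List (String × Int)), Dom_sum_rule twos threes m → Spec_sum_rule twos threes m (sum_rule twos threes m)

-- ===== LEMMAS AND PROOFS =====
theorem sumRuleScan_eq (vs : List Int) (h2 h3 : Bool) :
    sumRuleScan vs h2 h3 = (h2 || decide ((2 : Int) ∈ vs), h3 || decide ((3 : Int) ∈ vs)) := by
  induction vs generalizing h2 h3 with
  | nil => simp [sumRuleScan]
  | cons v vs ih =>
    simp only [sumRuleScan]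
    by_cases hv2 : v = 2 <;> by_cases hv3 : v = 3 <;>
      simp [hv2, hv3, ih] <;> first | (intros; assumption) | (split_ifs <;> simp_all [eq_comm])

-- ===== VERDICT (by name: the statement is the Claim_ definition above) =====
theorem sum_rule_spec : Claim_equal_sum_rule := by
  intro twos threes m _
  unfold Spec_sum_rule sum_rule sum_rule_alt
  rw [sumRuleScan_eq]
  by_cases h2 : (2 : Int) ∈ m.map Prod.snd <;>
  by_cases h3 : (3 : Int) ∈ m.map Prod.snd <;>
  simp [h2, h3]
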